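-- pv_equiv track=rewrite | github.com/dbeneat/AOC2015 | day19.py | allRep
-- ===== SOURCE A (Python) =====
-- def allRep(st,rule):
--     a,b=rule
--     k=len(a)
--     L=[]
--     for i in range(len(st)):
--         if st[i:i+k]==a:
--             L.append(st[:i]+b+st[i+k:])
--     return L
-- ===== SOURCE B (Python) =====
-- def allRep(st, rule):
--     a, b = rule
--     k, n = len(a), len(st)
--     if k == 0 or k > n:
--         return []
--     BASE = 1114112
--     target = 0
--     for c in a:
--         target = target * BASE + ord(c)
--     h = 0
--     for c in st[:k]:
--         h = h * BASE + ord(c)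
--     top = BASE ** (k - 1)
--     L = []
--     for i in range(n - k + 1):
--         if h == target:
--             L.append(st[:i] + b + st[i + k:])
--         if i + k < n:
--             h = (h - ord(st[i]) * top) * BASE + ord(st[i + k])
--     return L
-- ===== Notes on version B (the rewrite author's own statement) =====
-- stated objective: alternative
-- what changed: Replaced the probe-every-index slice comparison by exact Rabin-Karp: an exact (modulus-free, base 1114112 > any code point, hence collision-free) rolling hash of a k-wide window is updated in O(1) big-int operations per position and compared to the pattern's hash, instead of slicing and comparing st[i:i+k] at every index.
-- outside the precondition, e.g. on allRep('ab', ('', 'x')): A returns ['xab', 'axb'], B returns []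
import Mathlib
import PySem

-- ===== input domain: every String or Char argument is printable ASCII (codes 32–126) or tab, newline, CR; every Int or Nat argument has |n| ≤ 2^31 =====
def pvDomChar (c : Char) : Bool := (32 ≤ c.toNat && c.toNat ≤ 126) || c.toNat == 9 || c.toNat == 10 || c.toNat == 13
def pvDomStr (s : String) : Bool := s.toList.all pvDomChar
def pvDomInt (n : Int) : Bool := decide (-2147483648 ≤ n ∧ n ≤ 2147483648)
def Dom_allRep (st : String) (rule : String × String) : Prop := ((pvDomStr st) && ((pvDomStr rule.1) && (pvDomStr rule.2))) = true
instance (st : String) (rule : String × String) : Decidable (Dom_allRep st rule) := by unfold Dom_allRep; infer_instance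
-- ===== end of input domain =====

-- B replaces A's probe-every-index slice comparison by exact Rabin–Karp: an integer rolling hash
-- over a fixed-size window (base 1114112 > every code point, no modulus, hence collision-free).

-- ===== PORT A =====
def allRep (st : String) (rule : String × String) : List String :=
  let a := rule.1
  let b := rule.2
  let k : Int := PySem.Str.len a
  (PySem.List.pyRange 0 (PySem.Str.len st)).foldl
    (fun L i =>
      if PySem.List.slice st.toList (some i) (some (i + k)) == a.toList then
        L ++ [String.ofList (PySem.List.slice st.toList none (some i) ++ b.toList ++
                             PySem.List.slice st.toList (some (i + k)) none)]
      else L) []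

-- ===== PORT B =====
def allRep_alt (st : String) (rule : String × String) : List String :=
  let a := rule.1
  let b := rule.2
  let k : Int := PySem.Str.len a
  let n : Int := PySem.Str.len st
  if k == 0 || decide (n < k) then []
  else
    let target : Int := a.toList.foldl (fun h c => h * 1114112 + (c.toNat : Int)) 0
    let h0 : Int := (PySem.List.slice st.toList none (some k)).foldl
        (fun h c => h * 1114112 + (c.toNat : Int)) 0
    -- BASE ** (k - 1): exact, since 1 ≤ k in this branch the exponent is a Nat
    let top : Int := (1114112 : Int) ^ (k - 1).toNat
    ((PySem.List.pyRange 0 (n - k + 1)).foldl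
      (fun (p : Int × List String) i =>
        let L' := if p.1 == target then
            p.2 ++ [String.ofList (PySem.List.slice st.toList none (some i) ++ b.toList ++
                                   PySem.List.slice st.toList (some (i + k)) none)]
          else p.2
        let h' := if i + k < n then
            (p.1 - ((PySem.List.pyGetD st.toList i ' ').toNat : Int) * top) * 1114112 +
              ((PySem.List.pyGetD st.toList (i + k) ' ').toNat : Int)
          else p.1
        (h', L'))
      (h0, [])).2

-- ===== PRECONDITION & SPEC =====
-- Pre_ excludes only the empty pattern rule.1 == "": a degenerate corner on which A inserts b at
-- every position 0..len-1 while B's fixed-size-window algorithm has no window to hash and returns [];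
-- both readings of the empty pattern are defensible (str.replace would even insert at len+1 places).
def Pre_allRep (st : String) (rule : String × String) : Prop := rule.1 ≠ ""
instance (st : String) (rule : String × String) : Decidable (Pre_allRep st rule) := by unfold Pre_allRep; infer_instance
def pvWitness_allRep : String × (String × String) := ("ababa", ("ab", "X"))

def Spec_allRep (st : String) (rule : String × String) (out : List String) : Prop := out = allRep_alt st rule
instance (st : String) (rule : String × String) (out : List String) : Decidable (Spec_allRep st rule out) := by unfold Spec_allRep; infer_instance

-- ===== CLAIM (what is proved, stated in full; the proofs are below) =====
def Claim_equal_allRep : Prop := ∀ (st : String) (rule : String × String), Dom_allRep st rule → Pre_allRep st rule → Spec_allRep st rule (allRep st rule)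

-- ===== LEMMAS AND PROOFS =====

-- the string produced for a match at position j
def pvRepAt (cs b : List Char) (k : Nat) (j : Nat) : String :=
  String.ofList (cs.take j ++ b ++ cs.drop (j + k))

-- the (exact, base-1114112) polynomial hash of a list of characters
def pvVal (l : List Char) : Int := l.foldl (fun h c => h * 1114112 + (c.toNat : Int)) 0

lemma pvCharLt (c : Char) : c.toNat < 1114112 := by
  have := c.valid
  unfold UInt32.isValidChar Nat.isValidChar at this
  have h2 : c.toNat = c.val.toNat := rfl
  omega

lemma pv_foldl_shift (l : List Char) (h : Int) :
    l.foldl (fun h c => h * 1114112 + (c.toNat : Int)) h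
      = h * 1114112 ^ l.length + pvVal l := by
  induction l generalizing h with
  | nil => simp [pvVal]
  | cons c t ih =>
    have e2 : pvVal (c :: t) = t.foldl (fun h c => h * 1114112 + (c.toNat : Int)) (0 * 1114112 + (c.toNat : Int)) := rfl
    simp only [List.foldl_cons, List.length_cons, e2]
    rw [ih, ih]
    ring

-- the hash is collision-free on equal-length lists (base > every code point)
lemma pvVal_inj (l1 l2 : List Char) (hlen : l1.length = l2.length)
    (h : pvVal l1 = pvVal l2) : l1 = l2 := by
  induction l1 using List.reverseRecOn generalizing l2 with
  | nil => exact (List.eq_nil_of_length_eq_zero hlen.symm).symm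
  | append_singleton xs x ih =>
    have hne : l2 ≠ [] := by
      intro hc; rw [hc] at hlen; simp at hlen
    obtain ⟨ys, y, rfl⟩ : ∃ ys y, l2 = ys ++ [y] := by
      rcases List.eq_nil_or_concat l2 with h'|⟨ys,y,h'⟩
      · exact absurd h' hne
      · exact ⟨ys, y, by simpa [List.concat_eq_append] using h'⟩
    have e1 : pvVal (xs ++ [x]) = pvVal xs * 1114112 + (x.toNat : Int) := by
      simp [pvVal, List.foldl_append]
    have e2 : pvVal (ys ++ [y]) = pvVal ys * 1114112 + (y.toNat : Int) := by
      simp [pvVal, List.foldl_append]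
    rw [e1, e2] at h
    have hx := pvCharLt x
    have hy := pvCharLt y
    have hxy : x.toNat = y.toNat ∧ pvVal xs = pvVal ys := by
      constructor <;> omega
    have hchar : x = y := Char.ext (UInt32.toNat_inj.mp hxy.1)
    have hlen' : xs.length = ys.length := by
      simp at hlen; omega
    rw [ih ys hlen' hxy.2, hchar]

-- rolling step: the hash of the next window from the hash of the current one
lemma pv_roll (cs : List Char) (k i : Nat) (hk : 1 ≤ k) (hin : i + k < cs.length) :
    pvVal ((cs.drop (i+1)).take k)
      = (pvVal ((cs.drop i).take k) - ((cs.getD i ' ').toNat : Int) * 1114112 ^ (k-1)) * 1114112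
          + ((cs.getD (i+k) ' ').toNat : Int) := by
  have hi : i < cs.length := by omega
  have hik : i + k < cs.length := hin
  have hd : cs.drop i = cs[i] :: cs.drop (i+1) := List.drop_eq_getElem_cons hi
  have hgd1 : cs.getD i ' ' = cs[i] := List.getD_eq_getElem cs ' ' hi
  have hgd2 : cs.getD (i+k) ' ' = cs[i+k] := List.getD_eq_getElem cs ' ' hik
  have hwin1 : (cs.drop i).take k = cs[i] :: (cs.drop (i+1)).take (k-1) := by
    rw [show k = (k-1)+1 by omega, hd, List.take_succ_cons]
    simp
  have hlen2 : k - 1 < (cs.drop (i+1)).length := by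
    simp [List.length_drop]; omega
  have hget : (cs.drop (i+1))[k-1]'hlen2 = cs[i+k]'hik := by
    rw [List.getElem_drop]
    congr 1; omega
  have hwin2 : (cs.drop (i+1)).take k = (cs.drop (i+1)).take (k-1) ++ [cs[i+k]] := by
    conv_lhs => rw [show k = (k-1)+1 from by omega]
    rw [List.take_add_one, List.getElem?_eq_getElem hlen2, hget]
    rfl
  have hmidlen : ((cs.drop (i+1)).take (k-1)).length = k - 1 := by
    simp [List.length_take, List.length_drop]; omega
  have e1 : pvVal (cs[i] :: (cs.drop (i+1)).take (k-1))
      = ((cs[i]'hi).toNat : Int) * 1114112 ^ (k-1) + pvVal ((cs.drop (i+1)).take (k-1)) := by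
    have : pvVal (cs[i] :: (cs.drop (i+1)).take (k-1))
        = ((cs.drop (i+1)).take (k-1)).foldl (fun h c => h * 1114112 + (c.toNat : Int)) (0 * 1114112 + ((cs[i]'hi).toNat : Int)) := rfl
    rw [this, pv_foldl_shift, hmidlen]
    ring
  have e2 : pvVal ((cs.drop (i+1)).take (k-1) ++ [cs[i+k]])
      = pvVal ((cs.drop (i+1)).take (k-1)) * 1114112 + ((cs[i+k]'hik).toNat : Int) := by
    simp [pvVal, List.foldl_append]
  rw [hwin1, hwin2, e1, e2, hgd1, hgd2]
  ring

-- the hash comparison at an in-range window position is the prefix test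
lemma pv_hash_test (cs a : List Char) (s : Nat) (hk : 1 ≤ a.length)
    (hs : s + a.length ≤ cs.length) :
    (pvVal ((cs.drop s).take a.length) == pvVal a) = decide (a <+: cs.drop s) := by
  have hwl : ((cs.drop s).take a.length).length = a.length := by
    simp [List.length_take, List.length_drop]; omega
  by_cases hp : a <+: cs.drop s
  · have := List.prefix_iff_eq_take.mp hp
    simp [← this, hp]
  · simp only [hp, decide_false, beq_eq_false_iff_ne, ne_eq]
    intro hc
    have := pvVal_inj _ _ (by rw [hwl]) hc
    exact hp (List.prefix_iff_eq_take.mpr this.symm)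

-- an A-side slice test is the same prefix test
lemma pv_test_eq (cs a : List Char) (j : Nat) :
    (PySem.List.slice cs (some (j : Int)) (some ((j : Int) + (a.length : Int))) == a)
      = decide (a <+: cs.drop j) := by
  have : (j : Int) + (a.length : Int) = ((j + a.length : Nat) : Int) := by push_cast; ring
  rw [this, PySem.List.slice_natCast]
  have harith : j + a.length - j = a.length := by omega
  rw [harith]
  by_cases hp : a <+: cs.drop j
  · have := List.prefix_iff_eq_take.mp hp
    simp [← this, hp]
  · simp only [hp, decide_false, beq_eq_false_iff_ne, ne_eq]
    intro hc
    exact hp (List.prefix_iff_eq_take.mpr (by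
      rw [← hc]
      simp [List.length_take]))

-- a window that does not fit never matches
lemma pv_no_tail_match (cs a : List Char) (j : Nat) (hk : 1 ≤ a.length)
    (hj : cs.length < j + a.length) :
    decide (a <+: cs.drop j) = false := by
  simp only [decide_eq_false_iff_not]
  intro hp
  have h1 := hp.length_le
  rw [List.length_drop] at h1
  omega

lemma pv_filter_range_eq (n m : Nat) (p : Nat → Bool) (hmn : m ≤ n)
    (h : ∀ j, m ≤ j → j < n → p j = false) :
    (List.range n).filter p = (List.range m).filter p := by
  induction n, hmn using Nat.le_induction with
  | base => rfl
  | succ n hn ih =>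
    rw [List.range_succ, List.filter_append]
    rw [ih (fun j h1 h2 => h j h1 (by omega))]
    simp [h n hn (by omega)]

-- the rolling-hash loop collects exactly the matching window positions, in order
lemma pv_loop_eq (cs a b : List Char) (hk : 1 ≤ a.length) (hkn : a.length ≤ cs.length) :
    ∀ (cnt s : Nat) (L : List String) (h : Int),
      s + cnt = cs.length - a.length + 1 →
      (0 < cnt → h = pvVal ((cs.drop s).take a.length)) →
      ∃ h' : Int,
        ((List.range' s cnt).map (fun (j : Nat) => (j : Int))).foldl
          (fun (p : Int × List String) i =>
            ((if i + (a.length : Int) < (cs.length : Int) then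
                (p.1 - ((PySem.List.pyGetD cs i ' ').toNat : Int) * 1114112 ^ (a.length - 1)) * 1114112 +
                  ((PySem.List.pyGetD cs (i + (a.length : Int)) ' ').toNat : Int)
              else p.1),
             (if p.1 == pvVal a then
                p.2 ++ [String.ofList (PySem.List.slice cs none (some i) ++ b ++
                                       PySem.List.slice cs (some (i + (a.length : Int))) none)]
              else p.2))) (h, L)
        = (h', L ++ ((List.range' s cnt).filter
              (fun j => decide (a <+: cs.drop j))).map (pvRepAt cs b a.length)) := by
  intro cnt
  induction cnt with
  | zero => intro s L h _ _; exact ⟨h, by simp⟩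
  | succ cnt ih =>
    intro s L h hsum hinv
    have hs : s + a.length ≤ cs.length := by omega
    have hh : h = pvVal ((cs.drop s).take a.length) := hinv (by omega)
    have hcast : (s : Int) + (a.length : Int) = ((s + a.length : Nat) : Int) := by push_cast; ring
    have hrep : String.ofList (PySem.List.slice cs none (some (s : Int)) ++ b ++
                    PySem.List.slice cs (some ((s : Int) + (a.length : Int))) none)
        = pvRepAt cs b a.length s := by
      rw [hcast, PySem.List.slice_to_natCast, PySem.List.slice_from_natCast, pvRepAt]
    have htest : (h == pvVal a) = decide (a <+: cs.drop s) := by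
      rw [hh]; exact pv_hash_test cs a s hk hs
    rw [List.range'_succ, List.map_cons, List.foldl_cons]
    simp only [htest, hrep]
    set h2 := (if (s : Int) + (a.length : Int) < (cs.length : Int) then
        (h - ((PySem.List.pyGetD cs (s : Int) ' ').toNat : Int) * 1114112 ^ (a.length - 1)) * 1114112 +
          ((PySem.List.pyGetD cs ((s : Int) + (a.length : Int)) ' ').toNat : Int)
      else h) with hh2
    set L2 := (if decide (a <+: cs.drop s) = true then L ++ [pvRepAt cs b a.length s] else L) with hL2
    have hinv' : 0 < cnt → h2 = pvVal ((cs.drop (s+1)).take a.length) := by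
      intro hpos
      have hlt : s + a.length < cs.length := by omega
      have hcond : (s : Int) + (a.length : Int) < (cs.length : Int) := by omega
      rw [hh2, if_pos hcond, hh, hcast]
      simp only [PySem.List.pyGetD_natCast]
      rw [List.getD_eq_getElem cs ' ' (show s < cs.length by omega),
          List.getD_eq_getElem cs ' ' hlt,
          ← List.getD_eq_getElem cs ' ' (show s < cs.length by omega),
          ← List.getD_eq_getElem cs ' ' hlt]
      exact (pv_roll cs a.length s hk hlt).symm
    obtain ⟨h', hfold⟩ := ih (s+1) L2 h2 (by omega) hinv'
    refine ⟨h', ?_⟩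
    rw [hfold]
    by_cases hp : a <+: cs.drop s
    · simp [hp, hL2]
    · simp [hp, hL2]

-- ===== VERDICT (by name: the statement is the Claim_ definition above) =====
theorem allRep_spec : Claim_equal_allRep := by
  intro st rule _ hpre
  obtain ⟨a, b⟩ := rule
  unfold Spec_allRep
  have ha : a.toList ≠ [] := by
    intro hc
    exact hpre (by simpa using congrArg List.length hc)
  have hk1 : 1 ≤ a.toList.length := List.length_pos_of_ne_nil ha
  have hka : PySem.Str.len a = ((a.toList.length : Nat) : Int) := by simp
  have hns : PySem.Str.len st = ((st.toList.length : Nat) : Int) := by simp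
  simp only [allRep, allRep_alt, hka, hns]
  rw [PySem.List.foldl_append_if, PySem.List.pyRange_zero_natCast, List.filter_map,
    List.map_map]
  have hAfilter : (List.range st.toList.length).filter
        ((fun i => PySem.List.slice st.toList (some i) (some (i + ((a.toList.length : Nat) : Int))) == a.toList) ∘ (fun (j : Nat) => (j : Int)))
      = (List.range st.toList.length).filter (fun j => decide (a.toList <+: st.toList.drop j)) := by
    apply List.filter_congr
    intro j _
    simpa [Function.comp] using pv_test_eq st.toList a.toList j
  by_cases hnk : st.toList.length < a.toList.length
  · -- pattern longer than the string: both sides are []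
    rw [if_pos (by simp only [Bool.or_eq_true, beq_iff_eq, decide_eq_true_eq]; omega)]
    rw [hAfilter, pv_filter_range_eq st.toList.length 0 _ (Nat.zero_le _)
      (fun j _ _ => pv_no_tail_match st.toList a.toList j hk1 (by omega))]
    simp
  · -- 1 ≤ k ≤ n: the rolling-hash loop
    rw [Nat.not_lt] at hnk
    rw [if_neg (by simp only [Bool.or_eq_true, beq_iff_eq, decide_eq_true_eq]; omega)]
    have hm : ((st.toList.length : Nat) : Int) - ((a.toList.length : Nat) : Int) + 1
        = ((st.toList.length - a.toList.length + 1 : Nat) : Int) := by omega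
    have htop : (((a.toList.length : Nat) : Int) - 1).toNat = a.toList.length - 1 := by omega
    rw [hm, PySem.List.pyRange_zero_natCast, PySem.List.slice_to_natCast]
    simp only [htop]
    have hrep : ∀ j : Nat, String.ofList (PySem.List.slice st.toList none (some (j : Int)) ++ b.toList ++
                    PySem.List.slice st.toList (some ((j : Int) + ((a.toList.length : Nat) : Int))) none)
        = pvRepAt st.toList b.toList a.toList.length j := by
      intro j
      have hcast : (j : Int) + ((a.toList.length : Nat) : Int) = ((j + a.toList.length : Nat) : Int) := by
        push_cast; ring
      rw [hcast, PySem.List.slice_to_natCast, PySem.List.slice_from_natCast, pvRepAt]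
    have hinv : (0 : Nat) < st.toList.length - a.toList.length + 1 →
        (st.toList.take a.toList.length).foldl (fun h c => h * 1114112 + (c.toNat : Int)) 0
          = pvVal ((st.toList.drop 0).take a.toList.length) := by
      intro _
      simp [pvVal]
    obtain ⟨h', hfold⟩ := pv_loop_eq st.toList a.toList b.toList hk1 hnk
      (st.toList.length - a.toList.length + 1) 0 []
      ((st.toList.take a.toList.length).foldl (fun h c => h * 1114112 + (c.toNat : Int)) 0)
      (by omega) hinv
    simp only [pvVal] at hfold
    have hAmap : ∀ (l : List Nat),
        l.map ((fun i => String.ofList (PySem.List.slice st.toList none (some i) ++ b.toList ++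
            PySem.List.slice st.toList (some (i + ((a.toList.length : Nat) : Int))) none)) ∘ (fun (j : Nat) => (j : Int)))
          = l.map (pvRepAt st.toList b.toList a.toList.length) := by
      intro l
      apply List.map_congr_left
      intro j _
      simpa [Function.comp] using hrep j
    rw [hAfilter,
      pv_filter_range_eq st.toList.length (st.toList.length - a.toList.length + 1) _ (by omega)
        (fun j hj hjn => pv_no_tail_match st.toList a.toList j hk1 (by omega)),
      hAmap, List.range_eq_range']
    simpa using (congrArg Prod.snd hfold).symm
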